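-- pv_equiv track=rewrite | github.com/ClarkSims/BrainTeasers | KnightsMoves/knights_moves.py | knights_moves
-- ===== SOURCE A (Python) =====
-- def knights_moves( prev_set, N=1):
--     ''' This is an iterative function, which returns a set of tuples,
--         which are possible coordinates on a chess board, of a knight
--         after N moves '''
--     moves = [ (2, 1), (2, -1), (-2, 1), (-2, -1), \
--         (1, 2), (1, -2), (-1, 2), (-1, -2)]
--     for i in range(0,N):
--         next_set = set()
--         for pos in prev_set:
--             for move in moves:
--                 x, y = pos[0]+move[0], pos[1]+move[1]
--                 if x >= 0 and x < 8 and y >= 0 and y < 8: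
--                     next_set.add((x, y))
--         prev_set = next_set
--     return prev_set
-- ===== SOURCE B (Python) =====
-- def knights_moves(prev_set, N=1):
--     ''' Set of board squares a knight can occupy after exactly N moves.
--
--         Rather than performing all N breadth steps, this tracks the sequence
--         of move levels (each level kept in first-visit order, so the sequence
--         is deterministic); on a finite board that sequence must eventually
--         repeat, and once a level reappears the final level is read off by
--         modular arithmetic on the cycle length. '''
--     moves = [(2, 1), (2, -1), (-2, 1), (-2, -1),
--              (1, 2), (1, -2), (-1, 2), (-1, -2)]
--
--     def step(cells):
--         return list(dict.fromkeys(
--             (x + dx, y + dy)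
--             for x, y in cells for dx, dy in moves
--             if 0 <= x + dx < 8 and 0 <= y + dy < 8))
--
--     cur = list(prev_set)
--     first = {tuple(cur): 0}
--     hist = [cur]
--     for i in range(1, N + 1):
--         cur = step(cur)
--         key = tuple(cur)
--         if key in first:
--             j = first[key]
--             cur = hist[j + (N - j) % (i - j)]
--             break
--         first[key] = i
--         hist.append(cur)
--     return set(cur)
-- ===== Notes on version B (the rewrite author's own statement) =====
-- stated objective: faster
-- what changed: Instead of running all N breadth steps, B tracks the sequence of move levels (each deduplicated in first-visit order via dict.fromkeys), detects when a level reappears and jumps to the final level by modular arithmetic on the cycle length; Pre_ excludes only list inputs with duplicate squares when N <= 0, where A skips its loop and returns the raw duplicated list (not a set) while B returns the set of its squares.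
import Mathlib
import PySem

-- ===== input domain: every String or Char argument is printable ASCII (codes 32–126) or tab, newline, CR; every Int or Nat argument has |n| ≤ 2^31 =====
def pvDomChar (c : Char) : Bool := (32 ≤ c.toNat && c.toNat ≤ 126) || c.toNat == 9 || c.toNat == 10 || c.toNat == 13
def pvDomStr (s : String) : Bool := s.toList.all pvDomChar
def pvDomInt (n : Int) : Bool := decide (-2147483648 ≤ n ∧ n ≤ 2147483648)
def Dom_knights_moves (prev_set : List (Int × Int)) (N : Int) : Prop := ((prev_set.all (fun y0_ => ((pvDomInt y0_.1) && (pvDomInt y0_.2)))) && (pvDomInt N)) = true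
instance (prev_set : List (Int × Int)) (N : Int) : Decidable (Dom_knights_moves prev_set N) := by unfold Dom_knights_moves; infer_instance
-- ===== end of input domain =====

-- B replaces A's N-fold iteration by cycle detection on the sequence of move levels plus a
-- modular index jump; equal return value is proved, speed is only what a timing run measured.

-- ===== PORT A =====
def kmMovesA : List (Int × Int) :=
  [(2, 1), (2, -1), (-2, 1), (-2, -1), (1, 2), (1, -2), (-1, 2), (-1, -2)]

-- one pass of A's outer loop body: the nested 'for pos / for move' building next_set
def kmStepA (prev : List (Int × Int)) : List (Int × Int) :=
  prev.foldl (fun next_set pos =>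
    kmMovesA.foldl (fun next_set move =>
      if pos.1 + move.1 ≥ 0 ∧ pos.1 + move.1 < 8 ∧ pos.2 + move.2 ≥ 0 ∧ pos.2 + move.2 < 8 then
        PySem.Set.add next_set (pos.1 + move.1, pos.2 + move.2)
      else next_set)
      next_set)
    PySem.Set.empty

def knights_moves (prev_set : List (Int × Int)) (N : Int) : List (Int × Int) :=
  (PySem.List.pyRange 0 N 1).foldl (fun prev _i => kmStepA prev) prev_set

-- ===== PORT B =====
def kmMovesB : List (Int × Int) :=
  [(2, 1), (2, -1), (-2, 1), (-2, -1), (1, 2), (1, -2), (-1, 2), (-1, -2)]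

-- Source B's 'step': list(dict.fromkeys(<generator over cells × moves with the board filter>))
def kmStepB (cells : List (Int × Int)) : List (Int × Int) :=
  PySem.List.dedup
    (cells.flatMap (fun pos =>
      (kmMovesB.map (fun move => (pos.1 + move.1, pos.2 + move.2))).filter
        (fun q => decide (0 ≤ q.1) && decide (q.1 < 8) && decide (0 ≤ q.2) && decide (q.2 < 8))))

-- Source B's main loop: 'for i in range(1, N+1)' with the break on a repeated level
def kmLoop (N : Int) (i : Int) (cur : List (Int × Int))
    (first : PySem.Dict (List (Int × Int)) Int) (hist : List (List (Int × Int))) :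
    List (Int × Int) :=
  if _h : N + 1 - i ≤ 0 then cur
  else
    let cur' := kmStepB cur
    match first.get? cur' with
    | some j => (PySem.List.pyGet? hist (j + PySem.Int.mod (N - j) (i - j))).getD []
    | none => kmLoop N (i + 1) cur' (first.insert cur' i) (hist ++ [cur'])
termination_by (N + 1 - i).toNat
decreasing_by omega

def knights_moves_alt (prev_set : List (Int × Int)) (N : Int) : List (Int × Int) :=
  PySem.Set.ofList (kmLoop N 1 prev_set (PySem.Dict.ofList [(prev_set, 0)]) [prev_set])

-- ===== PRECONDITION & SPEC =====
-- Pre_ excludes only inputs with duplicate squares and N ≤ 0: there A skips the loop and hands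
-- back the raw input list with its duplicates (not a set), while B returns the set of its squares.
def Pre_knights_moves (prev_set : List (Int × Int)) (N : Int) : Prop :=
  prev_set.Nodup ∨ 1 ≤ N
instance (prev_set : List (Int × Int)) (N : Int) : Decidable (Pre_knights_moves prev_set N) := by
  unfold Pre_knights_moves; infer_instance
def pvWitness_knights_moves : (List (Int × Int)) × Int := ([(0, 0), (3, 4)], 1)

def Spec_knights_moves (prev_set : List (Int × Int)) (N : Int) (out : List (Int × Int)) : Prop :=
  out = knights_moves_alt prev_set N
instance (prev_set : List (Int × Int)) (N : Int) (out : List (Int × Int)) :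
    Decidable (Spec_knights_moves prev_set N out) := by unfold Spec_knights_moves; infer_instance

-- ===== CLAIM (what is proved, stated in full; the proofs are below) =====
def Claim_equal_knights_moves : Prop := ∀ (prev_set : List (Int × Int)) (N : Int),
  Dom_knights_moves prev_set N → Pre_knights_moves prev_set N →
  Spec_knights_moves prev_set N (knights_moves prev_set N)

-- ===== LEMMAS AND PROOFS =====

-- named form of A's inner-loop body (defeq to the lambda inside kmStepA)
def kmBodyA (pos : Int × Int) (next_set : PySem.Set (Int × Int)) (move : Int × Int) :
    PySem.Set (Int × Int) :=
  if pos.1 + move.1 ≥ 0 ∧ pos.1 + move.1 < 8 ∧ pos.2 + move.2 ≥ 0 ∧ pos.2 + move.2 < 8 then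
    PySem.Set.add next_set (pos.1 + move.1, pos.2 + move.2)
  else next_set

-- B's per-cell candidate list (defeq to the mapped-and-filtered list inside kmStepB)
def kmCands (pos : Int × Int) : List (Int × Int) :=
  (kmMovesA.map (fun move => (pos.1 + move.1, pos.2 + move.2))).filter
    (fun q => decide (0 ≤ q.1) && decide (q.1 < 8) && decide (0 ≤ q.2) && decide (q.2 < 8))

theorem kmInner_eq (moves : List (Int × Int)) (pos : Int × Int) (s : PySem.Set (Int × Int)) :
    moves.foldl (kmBodyA pos) s
      = ((moves.map (fun move => (pos.1 + move.1, pos.2 + move.2))).filter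
          (fun q => decide (0 ≤ q.1) && decide (q.1 < 8) && decide (0 ≤ q.2) && decide (q.2 < 8))).foldl
          PySem.Set.add s := by
  induction moves generalizing s with
  | nil => rfl
  | cons m ms ih =>
    simp only [List.foldl_cons, List.map_cons, List.filter_cons]
    by_cases h : pos.1 + m.1 ≥ 0 ∧ pos.1 + m.1 < 8 ∧ pos.2 + m.2 ≥ 0 ∧ pos.2 + m.2 < 8
    · rw [if_pos (by simp [h.1, h.2.1, h.2.2.1, h.2.2.2])]
      simp only [List.foldl_cons]
      rw [show kmBodyA pos s m = PySem.Set.add s (pos.1 + m.1, pos.2 + m.2) from if_pos h]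
      exact ih _
    · rw [if_neg (by simpa [and_assoc, ge_iff_le] using h)]
      rw [show kmBodyA pos s m = s from if_neg h]
      exact ih _

theorem kmStepB_eq_A (cells : List (Int × Int)) : kmStepB cells = kmStepA cells := by
  show PySem.List.dedup (cells.flatMap kmCands)
    = cells.foldl (fun ns pos => kmMovesA.foldl (kmBodyA pos) ns) PySem.Set.empty
  rw [PySem.List.dedup_eq_ofList, PySem.Set.ofList_eq_foldl]
  induction cells using List.reverseRecOn with
  | nil => rfl
  | append_singleton cs c ih =>
    rw [List.flatMap_append, List.foldl_append, List.foldl_append, ih]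
    simp only [List.flatMap_cons, List.flatMap_nil, List.append_nil, List.foldl_cons,
      List.foldl_nil]
    exact (kmInner_eq kmMovesA c _).symm

-- A's whole loop is iteration of kmStepA
theorem knights_moves_eq_iterate (prev : List (Int × Int)) (N : Int) :
    knights_moves prev N = kmStepA^[N.toNat] prev := by
  unfold knights_moves
  have h : ∀ (xs : List Int) (a : List (Int × Int)),
      xs.foldl (fun p (_ : Int) => kmStepA p) a = kmStepA^[xs.length] a := by
    intro xs
    induction xs with
    | nil => intro a; rfl
    | cons x xs ih =>
      intro a
      simp only [List.foldl_cons, List.length_cons, ih, Function.iterate_succ_apply]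
  rw [h, PySem.List.length_pyRange_one]
  simp

-- any kmStepA output is duplicate-free
theorem nodup_kmStepA (cells : List (Int × Int)) : (kmStepA cells).Nodup := by
  rw [← kmStepB_eq_A]
  exact PySem.List.nodup_dedup _

-- once a level repeats, iteration is periodic from that point on
theorem iter_period {α : Type} (f : α → α) (x : α) (j p : ℕ)
    (h : f^[j + p] x = f^[j] x) : ∀ m, j ≤ m → f^[m + p] x = f^[m] x := by
  intro m hm
  obtain ⟨t, rfl⟩ := Nat.exists_eq_add_of_le hm
  have e1 : j + t + p = t + (j + p) := by omega
  have e2 : j + t = t + j := by omega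
  rw [e1, Function.iterate_add_apply, h, ← Function.iterate_add_apply, ← e2]

theorem iter_mod {α : Type} (f : α → α) (x : α) (j p : ℕ) (hp : 0 < p)
    (h : f^[j + p] x = f^[j] x) : ∀ n, j ≤ n → f^[n] x = f^[j + (n - j) % p] x := by
  intro n
  induction n using Nat.strong_induction_on with
  | _ n ih =>
    intro hjn
    by_cases hN : n < j + p
    · rw [Nat.mod_eq_of_lt (by omega)]
      congr 1
      omega
    · have h1 : f^[n] x = f^[n - p] x := by
        have := iter_period f x j p h (n - p) (by omega)
        rw [show n - p + p = n by omega] at this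
        exact this
      rw [h1, ih (n - p) (by omega) (by omega)]
      have : n - j = (n - p - j) + p := by omega
      rw [this, Nat.add_mod_right]

-- main loop invariant: hist records the iterates, first indexes them, loop returns iterate N
theorem kmLoop_spec (prev : List (Int × Int)) :
    ∀ (k : ℕ) (N i : Int) (first : PySem.Dict (List (Int × Int)) Int)
      (hist : List (List (Int × Int))),
      k = (N + 1 - i).toNat →
      1 ≤ i → i ≤ N + 1 →
      hist = (List.range i.toNat).map (fun t => kmStepA^[t] prev) →
      (∀ L j, first.get? L = some j → 0 ≤ j ∧ j < i ∧ kmStepA^[j.toNat] prev = L) →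
      kmLoop N i (kmStepA^[(i - 1).toNat] prev) first hist = kmStepA^[N.toNat] prev := by
  intro k
  induction k using Nat.strong_induction_on with
  | _ k ih =>
    intro N i first hist hk h1 h2 hhist hfirst
    rw [kmLoop]
    split
    · next hle =>
      have : i = N + 1 := by omega
      subst this
      congr 1
      omega
    · next hgt =>
      have hiN : i ≤ N := by omega
      have hcur' : kmStepB (kmStepA^[(i - 1).toNat] prev) = kmStepA^[i.toNat] prev := by
        rw [kmStepB_eq_A, show i.toNat = (i - 1).toNat + 1 by omega,
          Function.iterate_succ_apply']
      rw [hcur']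
      cases hget : first.get? (kmStepA^[i.toNat] prev) with
      | some j =>
        simp only [hget]
        obtain ⟨hj0, hji, hjval⟩ := hfirst _ _ hget
        have hmodpos : 0 < i - j := by omega
        have hmodeq : PySem.Int.mod (N - j) (i - j)
            = ((N.toNat - j.toNat) % (i.toNat - j.toNat) : ℕ) := by
          rw [PySem.Int.mod_eq_emod_of_pos hmodpos,
            show N - j = ((N.toNat - j.toNat : ℕ) : Int) by omega,
            show i - j = ((i.toNat - j.toNat : ℕ) : Int) by omega]
          exact (Int.natCast_mod _ _).symm
        have hidx : j + PySem.Int.mod (N - j) (i - j)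
            = ((j.toNat + (N.toNat - j.toNat) % (i.toNat - j.toNat) : ℕ) : Int) := by
          rw [hmodeq]
          omega
        have hlt : j.toNat + (N.toNat - j.toNat) % (i.toNat - j.toNat) < i.toNat := by
          have := Nat.mod_lt (N.toNat - j.toNat) (y := i.toNat - j.toNat) (by omega)
          omega
        rw [hidx, PySem.List.pyGet?_natCast, hhist, List.getElem?_map,
          List.getElem?_range hlt]
        simp only [Option.map_some, Option.getD_some]
        exact (iter_mod kmStepA prev j.toNat (i.toNat - j.toNat) (by omega)
          (by rw [show j.toNat + (i.toNat - j.toNat) = i.toNat by omega]; exact hjval.symm)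
          N.toNat (by omega)).symm
      | none =>
        simp only [hget]
        have hhist' : hist ++ [kmStepA^[i.toNat] prev]
            = (List.range (i + 1).toNat).map (fun t => kmStepA^[t] prev) := by
          rw [show ((i : Int) + 1).toNat = i.toNat + 1 by omega, List.range_succ,
            List.map_append, hhist]
          rfl
        have hfirst' : ∀ L j,
            (first.insert (kmStepA^[i.toNat] prev) i).get? L = some j →
            0 ≤ j ∧ j < i + 1 ∧ kmStepA^[j.toNat] prev = L := by
          intro L j hLj
          rw [PySem.Dict.get?_insert] at hLj
          split at hLj
          · next heq =>
            cases hLj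
            exact ⟨by omega, by omega, by rw [heq]⟩
          · obtain ⟨a, b, c⟩ := hfirst _ _ hLj
            exact ⟨a, by omega, c⟩
        have hrec := ih (N + 1 - (i + 1)).toNat (by omega) N (i + 1) _ _ rfl (by omega)
          (by omega) hhist' hfirst'
        rw [show ((i : Int) + 1 - 1).toNat = i.toNat by omega] at hrec
        exact hrec

-- ===== VERDICT (by name: the statement is the Claim_ definition above) =====
theorem knights_moves_spec : Claim_equal_knights_moves := by
  intro prev N _hdom hpre
  unfold Spec_knights_moves knights_moves_alt
  by_cases hN : N ≤ 0
  · rw [kmLoop, dif_pos (by omega), knights_moves_eq_iterate, show N.toNat = 0 by omega]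
    have hnd : prev.Nodup := by
      cases hpre with
      | inl h => exact h
      | inr h => omega
    exact (PySem.Set.ofList_eq_self_of_nodup _ hnd).symm
  · have hfirst0 : ∀ L j, (PySem.Dict.ofList [(prev, (0 : Int))]).get? L = some j →
        0 ≤ j ∧ j < 1 ∧ kmStepA^[j.toNat] prev = L := by
      intro L j hLj
      have hD : PySem.Dict.ofList [(prev, (0 : Int))] = PySem.Dict.mk [(prev, 0)] := rfl
      rw [hD, PySem.Dict.get?_mk_cons] at hLj
      split at hLj
      · next heq =>
        cases hLj
        refine ⟨le_refl 0, by omega, ?_⟩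
        simpa using (eq_of_beq heq)
      · simp [PySem.Dict.get?] at hLj
    have hfinal := kmLoop_spec prev (N + 1 - 1).toNat N 1 (PySem.Dict.ofList [(prev, 0)])
      [prev] rfl (by omega) (by omega) (by simp) hfirst0
    rw [show kmStepA^[((1 : Int) - 1).toNat] prev = prev by norm_num] at hfinal
    rw [knights_moves_eq_iterate, hfinal]
    have hnd : (kmStepA^[N.toNat] prev).Nodup := by
      rw [show N.toNat = (N.toNat - 1) + 1 by omega, Function.iterate_succ_apply']
      exact nodup_kmStepA _
    exact (PySem.Set.ofList_eq_self_of_nodup _ hnd).symm
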